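-- pv_equiv track=rewrite | github.com/JiyooonPark/Algorithm | ThisIsTheRealCodingTest/Part2/chapter3/until_one.py | solution_given
-- ===== SOURCE A (Python) =====
-- def solution_given(N, K):
--     count = 0
--     while N >= K:
--         if N % K == 0:
--             N //= K
--             count += 1
--         else:
--             temp = N - K * (N // K)
--             N -= temp
--             count += temp
--     while N > 1:
--         N -= 1
--         count += 1
--     return count
-- ===== SOURCE B (Python) =====
-- def solution_given(N, K):
--     # Closed formula over the base-K representation of N:
--     # answer = (sum of base-K digits) + (number of digits) - 2.
--     if N < 2:
--         return 0
--     digits = []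
--     while N:
--         digits.append(N % K)
--         N //= K
--     return sum(digits) + len(digits) - 2
-- ===== Notes on version B (the rewrite author's own statement) =====
-- stated objective: simpler
-- what changed: Instead of A's greedy subtract-then-divide step counting with a trailing decrement loop, B converts N to its base-K digit list and returns the closed formula sum(digits) + len(digits) - 2.
-- outside the precondition, e.g. on solution_given(5, -2): A returns 0, B returns -2; on solution_given(3, 0): A raises ZeroDivisionError, B raises ZeroDivisionError
import Mathlib
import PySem

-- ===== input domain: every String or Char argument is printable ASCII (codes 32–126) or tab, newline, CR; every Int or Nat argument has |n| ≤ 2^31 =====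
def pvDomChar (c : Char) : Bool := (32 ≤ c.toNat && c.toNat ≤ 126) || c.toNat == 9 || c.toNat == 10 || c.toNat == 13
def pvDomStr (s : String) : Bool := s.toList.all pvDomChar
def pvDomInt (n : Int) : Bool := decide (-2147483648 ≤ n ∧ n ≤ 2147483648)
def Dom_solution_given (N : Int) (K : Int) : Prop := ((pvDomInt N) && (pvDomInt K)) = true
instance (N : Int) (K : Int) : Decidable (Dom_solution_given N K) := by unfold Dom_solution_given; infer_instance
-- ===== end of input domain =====

-- B replaces A's step-by-step greedy counting by the closed formula
-- sum(base-K digits of N) + number of digits - 2 (objective: simpler).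

-- ===== PORT A =====
-- first while loop of A; fuel only makes the recursion total (the loop can diverge for K ≤ 1)
def pvLoop1A (fuel : Nat) (N K count : Int) : Int × Int :=
  match fuel with
  | 0 => (N, count)
  | fuel + 1 =>
    if N ≥ K then
      if PySem.Int.mod N K = 0 then
        pvLoop1A fuel (PySem.Int.floordiv N K) K (count + 1)
      else
        let temp := N - K * (PySem.Int.floordiv N K)
        pvLoop1A fuel (N - temp) K (count + temp)
    else (N, count)

-- second while loop of A
def pvLoop2A (fuel : Nat) (N count : Int) : Int :=
  match fuel with
  | 0 => count
  | fuel + 1 => if N > 1 then pvLoop2A fuel (N - 1) (count + 1) else count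

def solution_given (N : Int) (K : Int) : Int :=
  let p := pvLoop1A (N.toNat + 1) N K 0
  pvLoop2A (p.1.toNat + 1) p.1 p.2

-- ===== PORT B =====
-- B's 'while N: digits.append(N % K); N //= K' loop; fuel only makes it total
def pvDigitsB (fuel : Nat) (N K : Int) : List Int :=
  match fuel with
  | 0 => []
  | fuel + 1 =>
    if N ≠ 0 then PySem.Int.mod N K :: pvDigitsB fuel (PySem.Int.floordiv N K) K
    else []

def solution_given_alt (N : Int) (K : Int) : Int :=
  if N < 2 then 0
  else
    let digits := pvDigitsB (N.toNat + 1) N K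
    digits.sum + (digits.length : Int) - 2

-- ===== PRECONDITION & SPEC =====
-- Pre_ excludes K ≤ 1 with N ≥ K: there A mods/divides by K ≤ 1 and raises ZeroDivisionError
-- (K = 0) or loops forever (e.g. K = 1, N ≥ 1); on scattered negative-K inputs A happens to
-- escape and return 0 (e.g. (5, -2)) while B's digit expansion yields another value.
def Pre_solution_given (N : Int) (K : Int) : Prop := 2 ≤ K ∨ N < K
instance (N : Int) (K : Int) : Decidable (Pre_solution_given N K) := by unfold Pre_solution_given; infer_instance
def pvWitness_solution_given : Int × Int := (59, 3)

def Spec_solution_given (N : Int) (K : Int) (out : Int) : Prop := out = solution_given_alt N K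
instance (N : Int) (K : Int) (out : Int) : Decidable (Spec_solution_given N K out) := by unfold Spec_solution_given; infer_instance

-- ===== CLAIM (what is proved, stated in full; the proofs are below) =====
def Claim_equal_solution_given : Prop := ∀ (N : Int) (K : Int), Dom_solution_given N K → Pre_solution_given N K → Spec_solution_given N K (solution_given N K)

-- ===== LEMMAS AND PROOFS =====

-- A's second loop, with enough fuel, is the closed form N - 1 (for N > 1)
lemma pvLoop2A_closed : ∀ (fuel : Nat) (N count : Int), N.toNat < fuel →
    pvLoop2A fuel N count = if N > 1 then count + N - 1 else count := by
  intro fuel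
  induction fuel with
  | zero => intro N count h; omega
  | succ f ih =>
    intro N count h
    simp only [pvLoop2A]
    by_cases h1 : N > 1
    · rw [if_pos h1, ih (N - 1) (count + 1) (by omega)]
      split_ifs <;> omega
    · rw [if_neg h1, if_neg h1]

-- A's two loops run in sequence
def pvRunA (fuel : Nat) (N K count : Int) : Int :=
  let p := pvLoop1A fuel N K count
  pvLoop2A (p.1.toNat + 1) p.1 p.2

-- main invariant: A's whole run equals count + sum(digits) + len(digits) - 2, for N ≥ 1, K ≥ 2
lemma pv_main : ∀ (n : Nat) (N K count : Int) (fa fb : Nat), 2 ≤ K → 1 ≤ N →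
    N.toNat ≤ n → N.toNat < fa → N.toNat < fb →
    pvRunA fa N K count
      = count + (pvDigitsB fb N K).sum + ((pvDigitsB fb N K).length : Int) - 2 := by
  intro n
  induction n using Nat.strong_induction_on with
  | _ n ih =>
    intro N K count fa fb hK hN1 hn hfa hfb
    have hKpos : (0:Int) < K := by omega
    have hm : PySem.Int.mod N K = N % K := PySem.Int.mod_eq_emod_of_pos hKpos
    have hd : PySem.Int.floordiv N K = N / K := PySem.Int.floordiv_eq_ediv_of_pos hKpos
    have hmod0 : 0 ≤ N % K := Int.emod_nonneg N (by omega)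
    have hmodK : N % K < K := Int.emod_lt_of_pos N hKpos
    have hdm : K * (N / K) + N % K = N := Int.mul_ediv_add_emod N K
    obtain ⟨fa', rfl⟩ : ∃ fa', fa = fa' + 1 := ⟨fa - 1, by omega⟩
    obtain ⟨fb', rfl⟩ : ∃ fb', fb = fb' + 1 := ⟨fb - 1, by omega⟩
    by_cases hNK : N ≥ K
    · -- N ≥ K ≥ 2: both peel one base-K digit
      have hq1 : 1 ≤ N / K := (Int.le_ediv_iff_mul_le hKpos).2 (by omega)
      have hqlt : N / K < N := by nlinarith
      have hdig : pvDigitsB (fb' + 1) N K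
          = N % K :: pvDigitsB fb' (N / K) K := by
        simp only [pvDigitsB, if_pos (show N ≠ 0 by omega), hm, hd]
      by_cases hz : PySem.Int.mod N K = 0
      · -- divisible: A steps to (N/K, count+1)
        have hz' : N % K = 0 := by rw [hm] at hz; exact hz
        have hA : pvRunA (fa' + 1) N K count = pvRunA fa' (N / K) K (count + 1) := by
          unfold pvRunA
          simp only [pvLoop1A, if_pos hNK, if_pos hz, hd]
        rw [hA, ih (N / K).toNat (by omega) (N / K) K (count + 1) fa' fb'
          hK (by omega) le_rfl (by omega) (by omega), hdig]
        simp only [List.sum_cons, List.length_cons, hz']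
        push_cast
        ring
      · -- not divisible: A subtracts temp = N % K, then (next iteration) divides
        have hz' : N % K ≠ 0 := by rw [hm] at hz; exact hz
        have hr1 : 1 ≤ N % K := by omega
        have h2q : 2 * (N / K) ≤ K * (N / K) := by nlinarith
        have hqlt2 : N / K ≤ N - 2 := by linarith
        have htemp : N - (N - K * PySem.Int.floordiv N K) = K * (N / K) := by
          rw [hd]; ring
        have htempc : count + (N - K * PySem.Int.floordiv N K) = count + N % K := by
          rw [hd]; omega
        have hstep2 : K * (N / K) ≥ K := by nlinarith
        have hdiv2 : PySem.Int.mod (K * (N / K)) K = 0 := by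
          rw [PySem.Int.mod_eq_emod_of_pos hKpos]
          exact Int.mul_emod_right K (N / K)
        have hdd : PySem.Int.floordiv (K * (N / K)) K = N / K := by
          rw [PySem.Int.floordiv_eq_ediv_of_pos hKpos]
          exact Int.mul_ediv_cancel_left _ (by omega)
        obtain ⟨fa'', rfl⟩ : ∃ f, fa' = f + 1 := ⟨fa' - 1, by omega⟩
        have hA : pvRunA (fa'' + 1 + 1) N K count
            = pvRunA fa'' (N / K) K (count + N % K + 1) := by
          unfold pvRunA
          simp only [pvLoop1A, if_pos hNK, if_neg hz, htemp, htempc,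
            if_pos (show K * (N / K) ≥ K from hstep2), if_pos hdiv2, hdd]
        rw [hA, ih (N / K).toNat (by omega) (N / K) K (count + N % K + 1) fa'' fb'
          hK (by omega) le_rfl (by omega) (by omega), hdig]
        simp only [List.sum_cons, List.length_cons]
        push_cast
        ring
    · -- 1 ≤ N < K: loop1 exits; loop2 = N - 1 (or 0); digits = [N]
      have hNmod : N % K = N := Int.emod_eq_of_lt (by omega) (by omega)
      have hNdiv : N / K = 0 := Int.ediv_eq_zero_of_lt (by omega) (by omega)
      have hdig : pvDigitsB (fb' + 1) N K = [N] := by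
        obtain ⟨fb'', rfl⟩ : ∃ f, fb' = f + 1 := ⟨fb' - 1, by omega⟩
        simp only [pvDigitsB, if_pos (show N ≠ 0 by omega), hm, hd, hNmod, hNdiv,
          if_neg (show ¬ ((0:Int) ≠ 0) by simp)]
      unfold pvRunA
      simp only [pvLoop1A, if_neg hNK]
      rw [pvLoop2A_closed (N.toNat + 1) N count (by omega), hdig]
      simp only [List.sum_cons, List.sum_nil, List.length_cons, List.length_nil]
      split_ifs <;> push_cast <;> omega

-- ===== VERDICT (by name: the statement is the Claim_ definition above) =====
theorem solution_given_spec : Claim_equal_solution_given := by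
  intro N K _ hPre
  unfold Spec_solution_given
  by_cases hN2 : N < 2
  · -- N ≤ 1: under Pre_, N < K, so A's two loops do nothing and return 0; B returns 0
    have hlt : N < K := by unfold Pre_solution_given at hPre; rcases hPre with h | h <;> omega
    have hNK : ¬ N ≥ K := by omega
    have hN1 : ¬ N > 1 := by omega
    unfold solution_given solution_given_alt
    simp only [pvLoop1A, if_neg hNK, pvLoop2A, if_neg hN1, if_pos hN2]
  · -- N ≥ 2: then K ≥ 2 (either from Pre_'s left disjunct, or K > N ≥ 2)
    have hK : 2 ≤ K := by unfold Pre_solution_given at hPre; rcases hPre with h | h <;> omega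
    have h := pv_main N.toNat N K 0 (N.toNat + 1) (N.toNat + 1) hK (by omega) le_rfl
      (by omega) (by omega)
    simp only [pvRunA] at h
    simp only [solution_given, solution_given_alt, if_neg hN2]
    omega
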